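-- pv_equiv track=rewrite | github.com/HarryGJ9/quantum_control | gradient_ascent_complete.py | perturbed_coupling_combs
-- ===== SOURCE A (Python) =====
-- def perturbed_coupling_combs(couplings, perturbed_couplings):
--     """
--     Calculate the different permuations of perturbed couplings e.g. if [100, 900] are the original
--     couplings, then it will return: [['110', '900'], ['090', '900'], ['100', '990'], ['100', '810']]
--     from which new perturbed genomes can be created.
--
--     Parameters:
--         couplings (lst): list of previous (or original) couplings
--         perturbed_couplings (lst): list of perturbed couplings
--     Returns:
--         lst: permutations of perturbed and original couplings from which we can evaluate fidelities and
--         calculate gradient wrt couplings.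
--     """
--
--     coupling_perms = []
--
--     # For each original coupling, replace it with its two perturbed values
--     for i in range(len(couplings)):
--         # Extract the two perturbed values corresponding to this coupling
--         p1, p2 = str(perturbed_couplings[2 * i]), str(perturbed_couplings[2 * i + 1])
--
--         # Create two new coupling lists by substituting the original coupling
--         for perturbed_value in [p1, p2]:
--             new_couplings = [str(c) for c in couplings]  # Ensure all couplings are strings
--             new_couplings[i] = perturbed_value           # Replace the specific coupling
--             coupling_perms.append(new_couplings)
--
--     return coupling_perms
-- ===== SOURCE B (Python) =====
-- def perturbed_coupling_combs(couplings, perturbed_couplings):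
--     if not couplings:
--         return []
--     head, tail = couplings[0], couplings[1:]
--     p1, p2 = str(perturbed_couplings[0]), str(perturbed_couplings[1])
--     tail_strs = [str(c) for c in tail]
--     rest = perturbed_coupling_combs(tail, perturbed_couplings[2:])
--     return [[p1] + tail_strs, [p2] + tail_strs] + [[str(head)] + row for row in rest]
-- ===== Notes on version B (the rewrite author's own statement) =====
-- stated objective: alternative
-- what changed: Replaces A's indexed nested loops (for each i, copy the stringified base list and overwrite position i with perturbed_couplings[2i]/[2i+1]) by structural recursion on the coupling list: each step consumes the first two perturbed values to emit the two head-replaced rows, recurses on (tail, perturbed[2:]), and prefixes str(head) to every recursive row; no index arithmetic, no base-list copy or in-place mutation.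
import Mathlib
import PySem

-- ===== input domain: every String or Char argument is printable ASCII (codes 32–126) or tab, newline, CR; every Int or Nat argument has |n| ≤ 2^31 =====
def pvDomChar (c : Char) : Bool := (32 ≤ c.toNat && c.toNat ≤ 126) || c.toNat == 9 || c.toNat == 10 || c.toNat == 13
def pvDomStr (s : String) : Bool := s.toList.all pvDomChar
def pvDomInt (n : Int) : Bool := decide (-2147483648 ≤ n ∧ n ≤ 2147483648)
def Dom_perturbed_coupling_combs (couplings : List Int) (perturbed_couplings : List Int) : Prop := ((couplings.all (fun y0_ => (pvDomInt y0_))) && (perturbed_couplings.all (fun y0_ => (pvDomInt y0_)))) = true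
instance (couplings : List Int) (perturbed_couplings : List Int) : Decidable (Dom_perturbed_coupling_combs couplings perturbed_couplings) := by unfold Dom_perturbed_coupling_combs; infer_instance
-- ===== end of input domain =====

-- B replaces A's indexed copy-then-overwrite loops by structural recursion on the coupling
-- list, consuming two perturbed values per step and prefixing str(head) to recursive rows (alternative decomposition; equal cost).


-- ===== PORT A =====
-- A: for i in range(len(couplings)): read the two perturbed values, and for each,
-- copy the stringified base list, overwrite position i, append.
def perturbed_coupling_combs (couplings : List Int) (perturbed_couplings : List Int) : List (List String) :=
  (PySem.List.pyRange 0 (couplings.length : Int) 1).foldl (fun acc i =>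
    let p1 := PySem.Int.toStr (PySem.List.pyGetD perturbed_couplings (2 * i) 0)
    let p2 := PySem.Int.toStr (PySem.List.pyGetD perturbed_couplings (2 * i + 1) 0)
    [p1, p2].foldl (fun acc2 pv =>
      acc2 ++ [(couplings.map PySem.Int.toStr).set i.toNat pv]) acc) []

-- ===== PORT B =====
-- B: structural recursion on couplings; each step emits the two head-replaced rows and
-- prefixes str(head) to every row of the recursive result on (tail, perturbed[2:]).
def perturbed_coupling_combs_alt (couplings : List Int) (perturbed_couplings : List Int) : List (List String) :=
  match couplings with
  | [] => []
  | h :: t =>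
    let p1 := PySem.Int.toStr (PySem.List.pyGetD perturbed_couplings 0 0)
    let p2 := PySem.Int.toStr (PySem.List.pyGetD perturbed_couplings 1 0)
    let ts := t.map PySem.Int.toStr
    let rest := perturbed_coupling_combs_alt t (PySem.List.slice perturbed_couplings (some 2) none)
    ([p1] ++ ts) :: ([p2] ++ ts) :: rest.map (fun row => [PySem.Int.toStr h] ++ row)

-- ===== PRECONDITION & SPEC =====
-- Pre_ excludes exactly the inputs where Python A raises IndexError:
-- perturbed_couplings must supply two values per coupling.
def Pre_perturbed_coupling_combs (couplings : List Int) (perturbed_couplings : List Int) : Prop :=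
  2 * couplings.length ≤ perturbed_couplings.length
instance (couplings : List Int) (perturbed_couplings : List Int) : Decidable (Pre_perturbed_coupling_combs couplings perturbed_couplings) := by unfold Pre_perturbed_coupling_combs; infer_instance
def pvWitness_perturbed_coupling_combs : List Int × List Int := ([100, 900], [110, 90, 990, 810])

def Spec_perturbed_coupling_combs (couplings : List Int) (perturbed_couplings : List Int) (out : List (List String)) : Prop := out = perturbed_coupling_combs_alt couplings perturbed_couplings
instance (couplings : List Int) (perturbed_couplings : List Int) (out : List (List String)) : Decidable (Spec_perturbed_coupling_combs couplings perturbed_couplings out) := by unfold Spec_perturbed_coupling_combs; infer_instance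

-- ===== CLAIM (what is proved, stated in full; the proofs are below) =====
def Claim_equal_perturbed_coupling_combs : Prop := ∀ (couplings : List Int) (perturbed_couplings : List Int), Dom_perturbed_coupling_combs couplings perturbed_couplings → Pre_perturbed_coupling_combs couplings perturbed_couplings → Spec_perturbed_coupling_combs couplings perturbed_couplings (perturbed_coupling_combs couplings perturbed_couplings)

-- ===== LEMMAS AND PROOFS =====

-- The two rows A appends for loop index i.
def pvG (c p : List Int) (i : Int) : List (List String) :=
  [(c.map PySem.Int.toStr).set i.toNat (PySem.Int.toStr (PySem.List.pyGetD p (2 * i) 0)),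
   (c.map PySem.Int.toStr).set i.toNat (PySem.Int.toStr (PySem.List.pyGetD p (2 * i + 1) 0))]

theorem pv_A_flat (c p : List Int) :
    perturbed_coupling_combs c p
      = (PySem.List.pyRange 0 (c.length : Int) 1).flatMap (pvG c p) := by
  unfold perturbed_coupling_combs
  simp only [List.foldl, List.append_assoc]
  rw [show (fun (acc : List (List String)) (i : Int) =>
        acc ++ ([(c.map PySem.Int.toStr).set i.toNat
                  (PySem.Int.toStr (PySem.List.pyGetD p (2 * i) 0))] ++
                [(c.map PySem.Int.toStr).set i.toNat
                  (PySem.Int.toStr (PySem.List.pyGetD p (2 * i + 1) 0))]))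
      = (fun acc i => acc ++ pvG c p i) from rfl,
    PySem.List.foldl_append_eq_flatMap, List.nil_append]

-- Indexing after dropping two elements.
theorem pv_pyGetD_drop2 (p : List Int) (k : Nat) :
    PySem.List.pyGetD (p.drop 2) (k : Int) 0 = PySem.List.pyGetD p ((k : Int) + 2) 0 := by
  rw [show ((k : Int) + 2) = ((k + 2 : Nat) : Int) by push_cast; ring,
    PySem.List.pyGetD_natCast, PySem.List.pyGetD_natCast]
  simp [List.getD, List.getElem?_drop, Nat.add_comm]

theorem pv_flat_eq_alt (c : List Int) : ∀ p : List Int,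
    (PySem.List.pyRange 0 (c.length : Int) 1).flatMap (pvG c p)
      = perturbed_coupling_combs_alt c p := by
  induction c with
  | nil => intro p; simp [PySem.List.pyRange_one_eq_nil, perturbed_coupling_combs_alt]
  | cons h t ih =>
    intro p
    have hn : (0 : Int) < ((h :: t).length : Int) := by simp
    rw [PySem.List.pyRange_one_cons hn, List.flatMap_cons, zero_add]
    have hsl : PySem.List.slice p (some 2) none = p.drop 2 := by
      rw [PySem.List.slice_from p (show (0:Int) ≤ 2 by omega)]; rfl
    have htail : PySem.List.pyRange 1 ((h :: t).length : Int) 1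
        = (List.range t.length).map (fun k : Nat => (1 : Int) + (k : Int)) := by
      rw [PySem.List.pyRange_one]
      norm_num
    have hzero : PySem.List.pyRange 0 (t.length : Int) 1
        = (List.range t.length).map (fun k : Nat => ((k : Int))) := by
      rw [PySem.List.pyRange_one]
      norm_num
    rw [htail, List.flatMap_map]
    have hstep : (fun k : Nat => pvG (h :: t) p (1 + (k : Int)))
        = fun k : Nat => (pvG t (p.drop 2) (k : Int)).map (fun row => [PySem.Int.toStr h] ++ row) := by
      funext k
      have h1 : ((1 : Int) + (k : Int)).toNat = k + 1 := by omega
      have e1 : 2 * ((1 : Int) + (k : Int)) = (2 * (k : Int) + 2) := by ring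
      have e2 : 2 * ((1 : Int) + (k : Int)) + 1 = ((2 * (k : Int) + 1) + 2) := by ring
      have d1 : PySem.List.pyGetD p (2 * ((1 : Int) + (k : Int))) 0
          = PySem.List.pyGetD (p.drop 2) (2 * (k : Int)) 0 := by
        rw [e1, show (2 * (k : Int)) = ((2 * k : Nat) : Int) by push_cast; ring,
          pv_pyGetD_drop2]
      have d2 : PySem.List.pyGetD p (2 * ((1 : Int) + (k : Int)) + 1) 0
          = PySem.List.pyGetD (p.drop 2) (2 * (k : Int) + 1) 0 := by
        rw [e2, show (2 * (k : Int) + 1) = ((2 * k + 1 : Nat) : Int) by push_cast; ring,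
          pv_pyGetD_drop2]
      have hk : ((k : Int)).toNat = k := by omega
      simp [pvG, d1, d2, h1, hk]
    rw [hstep]
    have hmf : ((List.range t.length).flatMap fun (k : Nat) =>
          (pvG t (p.drop 2) (k : Int)).map (fun row => [PySem.Int.toStr h] ++ row))
        = ((List.range t.length).flatMap fun (k : Nat) => pvG t (p.drop 2) (k : Int)).map
            (fun row => [PySem.Int.toStr h] ++ row) := by
      rw [List.map_flatMap]
    rw [hmf]
    have hrec : ((List.range t.length).flatMap fun (k : Nat) => pvG t (p.drop 2) (k : Int))
        = perturbed_coupling_combs_alt t (p.drop 2) := by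
      rw [← ih (p.drop 2), hzero, List.flatMap_map]
    rw [hrec]
    show pvG (h :: t) p 0 ++ _ = perturbed_coupling_combs_alt (h :: t) p
    conv_rhs => rw [perturbed_coupling_combs_alt]
    simp [pvG, hsl]

-- ===== VERDICT (by name: the statement is the Claim_ definition above) =====
theorem perturbed_coupling_combs_spec : Claim_equal_perturbed_coupling_combs := by
  intro c p _ _
  show _ = _
  rw [pv_A_flat, pv_flat_eq_alt]
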